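-- pv_equiv track=rewrite | github.com/pypi-data/pypi-mirror-293 | packages/yaookctl/yaookctl-0.0.1.tar.gz/yaookctl-0.0.1/yaookctl/status.py | evaluate_agent_status
-- ===== SOURCE A (Python) =====
-- import typing
--
-- def evaluate_agent_status(agent: typing.Mapping) -> str:
--     status = agent.get("status", {}).get("conditions", [])
--     try:
--         enabled_cond = [
--             cond
--             for cond in status if cond["type"] == "Enabled"
--         ][0]
--     except IndexError:
--         return "spawning"
--     try:
--         converged_cond = [
--             cond
--             for cond in status if cond["type"] == "Converged"
--         ][0]
--     except IndexError:
--         return "spawning"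
--
--     enabled = enabled_cond["status"]
--     converged = converged_cond["reason"]
--
--     try:
--         eviction_cond = [
--             cond
--             for cond in status if cond["type"] == "Evicted"
--         ][0]
--     except IndexError:
--         eviction = ""
--     else:
--         eviction = eviction_cond["status"]
--
--     if enabled == "True":
--         if converged != "Success":
--             return f"{converged.lower()}+up"
--         return "up"
--     elif enabled == "False":
--         if ((converged == "Dependency" or converged == "InProgress")
--                 and eviction == "Evicting"):
--             return "evicting"
--         if converged != "Success":
--             return f"{converged.lower()}+disabled"
--         return "disabled"
--     else:
--         return enabled.lower()
-- ===== SOURCE B (Python) =====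
-- def evaluate_agent_status(agent) -> str:
--     conds = agent.get("status", {}).get("conditions", [])
--     # single early-exiting pass with three explicit accumulators (no repeated scans, no dict)
--     enabled_cond = converged_cond = evicted_cond = None
--     for cond in conds:
--         t = cond["type"]
--         if t == "Enabled" and enabled_cond is None:
--             enabled_cond = cond
--         elif t == "Converged" and converged_cond is None:
--             converged_cond = cond
--         elif t == "Evicted" and evicted_cond is None:
--             evicted_cond = cond
--         if enabled_cond is not None and converged_cond is not None and evicted_cond is not None:
--             break
--     if enabled_cond is None or converged_cond is None:
--         return "spawning"
--     enabled = enabled_cond["status"]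
--     converged = converged_cond["reason"]
--     eviction = evicted_cond["status"] if evicted_cond is not None else ""
--     # decision tail: shared base suffix instead of duplicated per-branch returns
--     if enabled not in ("True", "False"):
--         return enabled.lower()
--     base = "up" if enabled == "True" else "disabled"
--     if enabled == "False" and converged in ("Dependency", "InProgress") and eviction == "Evicting":
--         return "evicting"
--     if converged == "Success":
--         return base
--     return converged.lower() + "+" + base
-- ===== Notes on version B (the rewrite author's own statement) =====
-- stated objective: alternative
-- what changed: B replaces A's three separate filter-scans plus try/except with one early-exiting pass carrying three explicit accumulators (first condition of each type, break when all found), and restructures the duplicated per-branch returns into a shared base-suffix decision tail.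
import Mathlib
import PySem

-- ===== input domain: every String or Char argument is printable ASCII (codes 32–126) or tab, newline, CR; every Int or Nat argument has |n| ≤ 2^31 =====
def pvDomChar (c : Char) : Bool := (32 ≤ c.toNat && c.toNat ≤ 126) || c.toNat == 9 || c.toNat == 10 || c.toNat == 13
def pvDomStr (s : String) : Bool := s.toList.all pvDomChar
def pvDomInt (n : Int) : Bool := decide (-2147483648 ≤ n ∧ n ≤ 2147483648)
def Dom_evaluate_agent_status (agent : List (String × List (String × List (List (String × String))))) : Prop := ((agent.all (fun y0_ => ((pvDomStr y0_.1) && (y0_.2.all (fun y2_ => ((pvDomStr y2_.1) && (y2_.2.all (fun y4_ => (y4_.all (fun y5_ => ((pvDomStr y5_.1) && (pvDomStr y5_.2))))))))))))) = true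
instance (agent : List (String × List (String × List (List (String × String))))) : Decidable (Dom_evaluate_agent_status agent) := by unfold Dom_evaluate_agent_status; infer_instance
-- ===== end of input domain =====

-- B replaces A's three filter scans by ONE early-exiting pass with three accumulators and a
-- shared base-suffix decision tail; objective: alternative (same cost, different structure).


-- shared accessors (both Pythons start with the same two .get lines and key lookups)
def pvStatus (agent : List (String × List (String × List (List (String × String))))) :
    List (List (String × String)) :=
  (PySem.Dict.mk ((PySem.Dict.mk agent).getD "status" [])).getD "conditions" []

def pvCondType (c : List (String × String)) : String :=
  (PySem.Dict.mk c).getD "type" ""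

-- ===== PORT A =====
def evaluate_agent_status (agent : List (String × List (String × List (List (String × String))))) : String :=
  let status := pvStatus agent
  match status.filter (fun c => pvCondType c == "Enabled") with
  | [] => "spawning"
  | enabled_cond :: _ =>
    match status.filter (fun c => pvCondType c == "Converged") with
    | [] => "spawning"
    | converged_cond :: _ =>
      let enabled := (PySem.Dict.mk enabled_cond).getD "status" ""
      let converged := (PySem.Dict.mk converged_cond).getD "reason" ""
      let eviction :=
        match status.filter (fun c => pvCondType c == "Evicted") with
        | [] => ""
        | eviction_cond :: _ => (PySem.Dict.mk eviction_cond).getD "status" ""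
      if enabled == "True" then
        if converged != "Success" then PySem.Str.lower converged ++ "+up" else "up"
      else if enabled == "False" then
        if (converged == "Dependency" || converged == "InProgress") && eviction == "Evicting" then
          "evicting"
        else if converged != "Success" then PySem.Str.lower converged ++ "+disabled"
        else "disabled"
      else PySem.Str.lower enabled

-- ===== PORT B =====
-- Source B's loop: one pass, three accumulators, `break` once all three are found.
def pvScan3 : List (List (String × String)) →
    Option (List (String × String)) × Option (List (String × String)) × Option (List (String × String)) →
    Option (List (String × String)) × Option (List (String × String)) × Option (List (String × String))
  | [], acc => acc
  | cond :: rest, (e, c, v) =>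
    let t := pvCondType cond
    let acc :=
      if t == "Enabled" && e.isNone then (some cond, c, v)
      else if t == "Converged" && c.isNone then (e, some cond, v)
      else if t == "Evicted" && v.isNone then (e, c, some cond)
      else (e, c, v)
    if acc.1.isSome && acc.2.1.isSome && acc.2.2.isSome then acc
    else pvScan3 rest acc

def evaluate_agent_status_alt (agent : List (String × List (String × List (List (String × String))))) : String :=
  let status := pvStatus agent
  match pvScan3 status (none, none, none) with
  | (some enabled_cond, some converged_cond, evicted_cond) =>
    let enabled := (PySem.Dict.mk enabled_cond).getD "status" ""
    let converged := (PySem.Dict.mk converged_cond).getD "reason" ""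
    let eviction :=
      match evicted_cond with
      | some vc => (PySem.Dict.mk vc).getD "status" ""
      | none => ""
    if !(enabled == "True" || enabled == "False") then PySem.Str.lower enabled
    else
      let base := if enabled == "True" then "up" else "disabled"
      if (enabled == "False" && (converged == "Dependency" || converged == "InProgress")) && eviction == "Evicting" then
        "evicting"
      else if converged == "Success" then base
      else PySem.Str.lower converged ++ "+" ++ base
  | _ => "spawning"

-- ===== PRECONDITION & SPEC =====
-- Pre_ excludes exactly the inputs on which Python A raises KeyError: a condition without a
-- "type" key, or a first "Enabled"/"Converged"/"Evicted" condition lacking the key the code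
-- reads from it ("status"/"reason") when both "Enabled" and "Converged" are present.
def Pre_evaluate_agent_status (agent : List (String × List (String × List (List (String × String))))) : Prop :=
  ((pvStatus agent).all (fun c => ((PySem.Dict.mk c).get? "type").isSome) &&
   (((pvStatus agent).filter (fun c => pvCondType c == "Enabled")).take 1).all (fun ec =>
     (((pvStatus agent).filter (fun c => pvCondType c == "Converged")).take 1).all (fun cc =>
       ((PySem.Dict.mk ec).get? "status").isSome &&
       ((PySem.Dict.mk cc).get? "reason").isSome &&
       (((pvStatus agent).filter (fun c => pvCondType c == "Evicted")).take 1).all (fun vc =>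
         ((PySem.Dict.mk vc).get? "status").isSome)))) = true
instance (agent : List (String × List (String × List (List (String × String))))) : Decidable (Pre_evaluate_agent_status agent) := by unfold Pre_evaluate_agent_status; infer_instance

def pvWitness_evaluate_agent_status : (List (String × List (String × List (List (String × String))))) :=
  [("status", [("conditions",
    [[("type", "Enabled"), ("status", "True")],
     [("type", "Converged"), ("reason", "Success")]])])]

def Spec_evaluate_agent_status (agent : List (String × List (String × List (List (String × String))))) (out : String) : Prop := out = evaluate_agent_status_alt agent
instance (agent : List (String × List (String × List (List (String × String))))) (out : String) : Decidable (Spec_evaluate_agent_status agent out) := by unfold Spec_evaluate_agent_status; infer_instance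

-- ===== CLAIM (what is proved, stated in full; the proofs are below) =====
def Claim_equal_evaluate_agent_status : Prop := ∀ (agent : List (String × List (String × List (List (String × String))))), Dom_evaluate_agent_status agent → Pre_evaluate_agent_status agent → Spec_evaluate_agent_status agent (evaluate_agent_status agent)

-- ===== LEMMAS AND PROOFS =====

-- The early-exiting scan computes, for each of the three types, the first condition of that
-- type (seeded through any starting accumulator): the break is sound because once all three
-- slots are filled the rest of the list cannot change them.
theorem pvScan3_eq_filters (l : List (List (String × String)))
    (e c v : Option (List (String × String))) :
    pvScan3 l (e, c, v) =
      (e.or ((l.filter (fun x => pvCondType x == "Enabled")).head?),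
       c.or ((l.filter (fun x => pvCondType x == "Converged")).head?),
       v.or ((l.filter (fun x => pvCondType x == "Evicted")).head?)) := by
  induction l generalizing e c v with
  | nil => simp [pvScan3]
  | cons cond rest ih =>
    simp only [pvScan3, List.filter_cons]
    by_cases hE : pvCondType cond = "Enabled"
    · rcases e with _ | ev
      · -- slot empty: take cond
        simp only [hE, beq_self_eq_true, Bool.true_and, Option.isNone_none, if_pos]
        have h2 : (("Enabled" : String) == "Converged") = false := by decide
        have h3 : (("Enabled" : String) == "Evicted") = false := by decide
        by_cases hall : c.isSome = true ∧ v.isSome = true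
        · rcases c with _ | cv; · simp at hall
          rcases v with _ | vv; · simp at hall
          simp [hE, h2, h3]
        · have : (c.isSome && v.isSome) = false := by
            rcases c with _ | cv <;> rcases v with _ | vv <;> simp_all
          rcases c with _ | cv <;> rcases v with _ | vv <;>
            simp_all [ih, hE, h2, h3]
      · -- slot full: no-op branch (the two other tests fail since t = "Enabled")
        have h2 : (("Enabled" : String) == "Converged") = false := by decide
        have h3 : (("Enabled" : String) == "Evicted") = false := by decide
        by_cases hall : c.isSome = true ∧ v.isSome = true
        · rcases c with _ | cv; · simp at hall
          rcases v with _ | vv; · simp at hall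
          simp [hE, h2, h3]
        · rcases c with _ | cv <;> rcases v with _ | vv <;>
            simp_all [ih, hE, h2, h3]
    · by_cases hC : pvCondType cond = "Converged"
      · have h1 : (pvCondType cond == "Enabled") = false := by simp [hE]
        have h3 : (("Converged" : String) == "Evicted") = false := by decide
        rcases c with _ | cv
        · by_cases hall : e.isSome = true ∧ v.isSome = true
          · rcases e with _ | ev; · simp at hall
            rcases v with _ | vv; · simp at hall
            simp [hC, h1, h3]
          · rcases e with _ | ev <;> rcases v with _ | vv <;>
              simp_all [ih, hC, h1, h3]
        · by_cases hall : e.isSome = true ∧ v.isSome = true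
          · rcases e with _ | ev; · simp at hall
            rcases v with _ | vv; · simp at hall
            simp [hC, h1, h3]
          · rcases e with _ | ev <;> rcases v with _ | vv <;>
              simp_all [ih, hC, h1, h3]
      · by_cases hV : pvCondType cond = "Evicted"
        · have h1 : (pvCondType cond == "Enabled") = false := by simp [hE]
          have h2 : (pvCondType cond == "Converged") = false := by simp [hC]
          rcases v with _ | vv
          · by_cases hall : e.isSome = true ∧ c.isSome = true
            · rcases e with _ | ev; · simp at hall
              rcases c with _ | cv; · simp at hall
              simp [hV, h1, h2]
            · rcases e with _ | ev <;> rcases c with _ | cv <;>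
                simp_all [ih, hV, h1, h2]
          · by_cases hall : e.isSome = true ∧ c.isSome = true
            · rcases e with _ | ev; · simp at hall
              rcases c with _ | cv; · simp at hall
              simp [hV, h1, h2]
            · rcases e with _ | ev <;> rcases c with _ | cv <;>
                simp_all [ih, hV, h1, h2]
        · have h1 : (pvCondType cond == "Enabled") = false := by simp [hE]
          have h2 : (pvCondType cond == "Converged") = false := by simp [hC]
          have h3 : (pvCondType cond == "Evicted") = false := by simp [hV]
          by_cases hall : e.isSome = true ∧ c.isSome = true ∧ v.isSome = true
          · rcases e with _ | ev; · simp at hall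
            rcases c with _ | cv; · simp at hall
            rcases v with _ | vv; · simp at hall
            simp [h1, h2, h3]
          · rcases e with _ | ev <;> rcases c with _ | cv <;> rcases v with _ | vv <;>
              simp_all [ih, h1, h2, h3]

-- A's duplicated branch returns equal B's shared base-suffix decision tail.
theorem branch_tail_eq (enabled converged eviction : String) :
    (if enabled == "True" then
       if converged != "Success" then PySem.Str.lower converged ++ "+up" else "up"
     else if enabled == "False" then
       if (converged == "Dependency" || converged == "InProgress") && eviction == "Evicting" then
         "evicting"
       else if converged != "Success" then PySem.Str.lower converged ++ "+disabled"
       else "disabled"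
     else PySem.Str.lower enabled)
    =
    (if !(enabled == "True" || enabled == "False") then PySem.Str.lower enabled
     else
       let base := if enabled == "True" then "up" else "disabled"
       if (enabled == "False" && (converged == "Dependency" || converged == "InProgress")) && eviction == "Evicting" then
         "evicting"
       else if converged == "Success" then base
       else PySem.Str.lower converged ++ "+" ++ base) := by
  have hup : ∀ s : String, s ++ "+" ++ "up" = s ++ "+up" := by
    intro s; rw [String.append_assoc]; rfl
  have hdis : ∀ s : String, s ++ "+" ++ "disabled" = s ++ "+disabled" := by
    intro s; rw [String.append_assoc]; rfl
  by_cases hT : enabled = "True"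
  · subst hT
    by_cases hS : converged = "Success" <;> simp [hS, hup]
  · by_cases hF : enabled = "False"
    · subst hF
      by_cases hS : converged = "Success"
      · simp [hS]
      · by_cases hD : (converged == "Dependency" || converged == "InProgress") && eviction == "Evicting" <;>
          simp_all [hdis]
    · simp [hT, hF]

-- ===== VERDICT (by name: the statement is the Claim_ definition above) =====
theorem evaluate_agent_status_spec : Claim_equal_evaluate_agent_status := by
  intro agent _ _
  unfold Spec_evaluate_agent_status evaluate_agent_status evaluate_agent_status_alt
  simp only [pvScan3_eq_filters, Option.or_none, Option.none_or]
  rcases (pvStatus agent).filter (fun c => pvCondType c == "Enabled") with _ | ⟨ec, _⟩ <;>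
    rcases (pvStatus agent).filter (fun c => pvCondType c == "Converged") with _ | ⟨cc, _⟩ <;>
    rcases (pvStatus agent).filter (fun c => pvCondType c == "Evicted") with _ | ⟨vc, _⟩ <;>
    simp only [List.head?_nil, List.head?_cons] <;>
    first
      | rfl
      | exact branch_tail_eq _ _ _
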